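-- pv_equiv track=rewrite | github.com/stephsilne/CS-115 | homework/life_starter/life.py | innerCells
-- ===== SOURCE A (Python) =====
-- def createOneRow(width):
--     """Returns one row of zeros of width "width"...
--        You should use this in your
--        createBoard(width, height) function."""
--     row = []
--     for col in range(width):
--         row += [0]
--     return row
--
-- def createBoard(width,height):
--     '''creates and returns a new 2D list of height rows and width columns with all elements equaling 0'''
--     A = []
--     '''initializes A to be an empty list'''
--     for row in range(height):
--         '''for every row of the range of height'''
--         A += [createOneRow(width)]
--         '''increments A for every iteration of the list createOneRow(width)'''
--     return A
--     '''returns the final board A'''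
--
-- def innerCells(w,h):
--     '''takes in a width w and height h and returns a 2d array of live cells except outer edges'''
--     A = createBoard(w,h)
--     '''sets A to be a board of the same width and height given'''
--     for row in range(1,h-1):
--         '''for every iterative row between the first and last row'''
--         for col in range(1,w-1):
--             '''for every iterative column between the first and last column'''
--             A[row][col] = 1
--             '''set each cell within these borders to equal 1'''
--     return A
--     '''returns the final board A'''
-- ===== SOURCE B (Python) =====
-- def innerCells(w, h):
--     '''takes in a width w and height h and returns a 2d array of live cells except outer edges'''
--     board = []
--     for r in range(h):
--         if 0 < r < h - 1:
--             board.append([1 if 0 < c < w - 1 else 0 for c in range(w)])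
--         else:
--             board.append([0] * w)
--     return board
-- ===== Notes on version B (the rewrite author's own statement) =====
-- stated objective: simpler
-- what changed: One pass that computes each cell's final value directly (interior test per row/cell), replacing A's fill-with-zeros-then-overwrite-interior two-pass scheme and dropping the createOneRow/createBoard helpers.
import Mathlib
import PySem

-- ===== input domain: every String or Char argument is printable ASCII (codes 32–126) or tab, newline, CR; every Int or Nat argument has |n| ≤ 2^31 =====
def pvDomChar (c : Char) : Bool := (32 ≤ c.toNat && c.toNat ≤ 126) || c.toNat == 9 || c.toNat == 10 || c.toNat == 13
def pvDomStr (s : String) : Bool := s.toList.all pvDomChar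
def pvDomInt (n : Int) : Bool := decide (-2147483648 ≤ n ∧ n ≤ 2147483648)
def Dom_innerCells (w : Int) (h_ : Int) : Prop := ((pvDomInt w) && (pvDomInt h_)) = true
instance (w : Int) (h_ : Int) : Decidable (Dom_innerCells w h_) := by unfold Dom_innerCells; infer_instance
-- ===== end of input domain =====

-- B replaces A's build-zero-board-then-overwrite-interior two-pass scheme by one pass that
-- computes each cell's final value directly (objective: simpler; same return value, total).

-- ===== PORT A =====
def createOneRow (width : Int) : List Int :=
  (PySem.List.pyRange 0 width 1).foldl (fun row _ => row ++ [0]) []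

def createBoard (width : Int) (height : Int) : List (List Int) :=
  (PySem.List.pyRange 0 height 1).foldl (fun A _ => A ++ [createOneRow width]) []

-- A[row][col] = 1: row and col come from range(1, …) so they are ≥ 1; .toNat is exact there,
-- and both indices are always in range, so List.modify/List.set match Python's assignment exactly.
def innerCells (w : Int) (h_ : Int) : List (List Int) :=
  (PySem.List.pyRange 1 (h_ - 1) 1).foldl
    (fun A row =>
      (PySem.List.pyRange 1 (w - 1) 1).foldl
        (fun A col => A.modify row.toNat (fun r => r.set col.toNat 1)) A)
    (createBoard w h_)

-- ===== PORT B =====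
-- [0] * w is List.replicate w.toNat 0 (empty for w ≤ 0, exactly as in Python);
-- the for/append loop is the foldl pushing one fresh row per iteration.
def innerCells_alt (w : Int) (h_ : Int) : List (List Int) :=
  (PySem.List.pyRange 0 h_ 1).foldl
    (fun board r =>
      board ++ [if 0 < r ∧ r < h_ - 1 then
                  (PySem.List.pyRange 0 w 1).map (fun c => if 0 < c ∧ c < w - 1 then (1 : Int) else 0)
                else List.replicate w.toNat 0])
    []

-- ===== PRECONDITION & SPEC =====
def Spec_innerCells (w : Int) (h_ : Int) (out : List (List Int)) : Prop := out = innerCells_alt w h_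
instance (w : Int) (h_ : Int) (out : List (List Int)) : Decidable (Spec_innerCells w h_ out) := by unfold Spec_innerCells; infer_instance

-- ===== CLAIM (what is proved, stated in full; the proofs are below) =====
def Claim_equal_innerCells : Prop := ∀ (w : Int) (h_ : Int), Dom_innerCells w h_ → Spec_innerCells w h_ (innerCells w h_)

-- ===== LEMMAS AND PROOFS =====

-- a foldl that appends one element per iteration is a map
theorem pv_foldl_push {α β : Type} (f : α → β) (l : List α) (acc : List β) :
    l.foldl (fun acc x => acc ++ [f x]) acc = acc ++ l.map f := by
  induction l generalizing acc with
  | nil => simp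
  | cons x t ih => simp [List.foldl_cons, ih]

theorem pv_createOneRow (w : Int) : createOneRow w = List.replicate w.toNat 0 := by
  unfold createOneRow
  rw [show (fun (row : List Int) (_ : Int) => row ++ [0]) = fun row x => row ++ [(fun _ => (0:Int)) x] from rfl,
      pv_foldl_push]
  simp [List.map_const', PySem.List.length_pyRange_one]

theorem pv_createBoard (w h_ : Int) :
    createBoard w h_ = List.replicate h_.toNat (List.replicate w.toNat 0) := by
  unfold createBoard
  rw [show (fun (A : List (List Int)) (_ : Int) => A ++ [createOneRow w]) =
        fun A x => A ++ [(fun _ => createOneRow w) x] from rfl, pv_foldl_push]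
  simp [List.map_const', PySem.List.length_pyRange_one, pv_createOneRow]

-- pointwise description of the inner column loop
theorem pv_set_fold_getElem? (l : List Int) (h0 : ∀ x ∈ l, 0 ≤ x) (row : List Int) (j : Nat) :
    (l.foldl (fun r c => r.set c.toNat 1) row)[j]? =
      if (j : Int) ∈ l ∧ j < row.length then some 1 else row[j]? := by
  induction l generalizing row with
  | nil => simp
  | cons c t ih =>
    have hc : 0 ≤ c := h0 c (by simp)
    rw [List.foldl_cons, ih (fun x hx => h0 x (by simp [hx]))]
    by_cases hm : (j : Int) ∈ t ∧ j < (row.set c.toNat 1).length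
    · have : (j : Int) ∈ c :: t ∧ j < row.length := by
        simpa [List.length_set] using And.intro (List.mem_cons_of_mem _ hm.1) hm.2
      simp [hm, this]
    · rw [if_neg hm]
      by_cases hcj : c.toNat = j
      · have hcj' : c = (j : Int) := by omega
        subst hcj
        by_cases hlen : c.toNat < row.length
        · rw [List.getElem?_set_self hlen,
              if_pos ⟨by rw [← hcj']; exact List.mem_cons_self, hlen⟩]
        · rw [List.getElem?_set, if_pos rfl, if_neg hlen,
              if_neg (fun h => hlen h.2), List.getElem?_eq_none (by omega)]
      · rw [List.getElem?_set_ne hcj]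
        have hnot : ¬ ((j : Int) ∈ c :: t ∧ j < row.length) := by
          rintro ⟨hmem, hlt⟩
          rcases List.mem_cons.mp hmem with h | h
          · exact hcj (by omega)
          · exact hm ⟨h, by simpa [List.length_set] using hlt⟩
        rw [if_neg hnot]

theorem pv_set_fold_length (l : List Int) (row : List Int) :
    (l.foldl (fun r c => r.set c.toNat 1) row).length = row.length := by
  induction l generalizing row with
  | nil => rfl
  | cons c t ih => rw [List.foldl_cons, ih, List.length_set]

-- the row-update function of A's interior loop
def pvG (w : Int) (row : List Int) : List Int :=
  (PySem.List.pyRange 1 (w - 1) 1).foldl (fun r c => r.set c.toNat 1) row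

theorem pvG_cols_nonneg (w : Int) : ∀ x ∈ PySem.List.pyRange 1 (w - 1) 1, (0 : Int) ≤ x := by
  intro x hx
  have := (PySem.List.mem_pyRange_one).mp hx
  omega

theorem pvG_getElem? (w : Int) (row : List Int) (j : Nat) :
    (pvG w row)[j]? = if (j : Int) ∈ PySem.List.pyRange 1 (w - 1) 1 ∧ j < row.length
      then some 1 else row[j]? := pv_set_fold_getElem? _ (pvG_cols_nonneg w) row j

theorem pvG_idem (w : Int) (row : List Int) : pvG w (pvG w row) = pvG w row := by
  apply List.ext_getElem?
  intro j
  have hl : (pvG w row).length = row.length := pv_set_fold_length _ _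
  by_cases hm : (j : Int) ∈ PySem.List.pyRange 1 (w - 1) 1 ∧ j < row.length
  · rw [pvG_getElem?, if_pos (by rw [hl]; exact hm), pvG_getElem?, if_pos hm]
  · rw [pvG_getElem?, if_neg (by rw [hl]; exact hm), pvG_getElem?, if_neg hm]

-- pointwise description of a fold of modifies at distinct-or-idempotent rows
theorem pv_modify_fold_getElem? (g : List Int → List Int) (hg : ∀ x, g (g x) = g x)
    (l : List Int) (h0 : ∀ x ∈ l, 0 ≤ x) (A : List (List Int)) (j : Nat) :
    (l.foldl (fun A r => A.modify r.toNat g) A)[j]? =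
      if (j : Int) ∈ l then A[j]?.map g else A[j]? := by
  induction l generalizing A with
  | nil => simp
  | cons r t ih =>
    have hr : 0 ≤ r := h0 r (by simp)
    rw [List.foldl_cons, ih (fun x hx => h0 x (by simp [hx]))]
    have hmod : ∀ k : Nat, (A.modify r.toNat g)[k]? = if r.toNat = k then A[k]?.map g else A[k]? := by
      intro k
      rw [List.getElem?_modify]
      by_cases hk : r.toNat = k
      · simp [hk, Option.map]
      · simp [hk]
    by_cases hrj : r = (j : Int)
    · have hrj' : r.toNat = j := by omega
      by_cases hmem : (j : Int) ∈ t
      · rw [if_pos hmem, if_pos (by simp [hrj]), hmod, if_pos hrj', Option.map_map]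
        cases A[j]? with
        | none => rfl
        | some a => simp [Function.comp, hg]
      · rw [if_neg hmem, if_pos (by simp [hrj]), hmod, if_pos hrj']
    · have hrj' : r.toNat ≠ j := by omega
      rw [hmod j, if_neg hrj']
      by_cases hmem : (j : Int) ∈ t
      · simp [hmem, List.mem_cons]
      · have hnot : (j : Int) ∉ r :: t := by
          intro h
          rcases List.mem_cons.mp h with h | h
          · exact hrj h.symm
          · exact hmem h
        rw [if_neg hmem, if_neg hnot]

-- A's interior row equals B's directly-computed row
theorem pv_row_eq (w : Int) :
    pvG w (List.replicate w.toNat 0) =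
      (PySem.List.pyRange 0 w 1).map (fun c => if 0 < c ∧ c < w - 1 then (1 : Int) else 0) := by
  apply List.ext_getElem?
  intro k
  rw [pvG_getElem?]
  by_cases hk : k < w.toNat
  · have hsome : (PySem.List.pyRange 0 w 1)[k]? = some (0 + (k : Int)) := by
      rw [PySem.List.getElem?_pyRange_one, if_pos (show k < (w - 0).toNat by omega)]
    rw [List.getElem?_map, hsome, Option.map_some]
    by_cases hm : (k : Int) ∈ PySem.List.pyRange 1 (w - 1) 1
    · have hkm := (PySem.List.mem_pyRange_one).mp hm
      rw [if_pos ⟨hm, by simpa using hk⟩, if_pos (by omega)]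
    · have hkm : ¬ (1 ≤ (k : Int) ∧ (k : Int) < w - 1) :=
        fun h => hm ((PySem.List.mem_pyRange_one).mpr h)
      rw [if_neg (fun h => hm h.1), if_neg (by omega), List.getElem?_replicate, if_pos hk]
  · have hlen : ¬ (k < (List.replicate w.toNat (0:Int)).length) := by simpa using hk
    rw [if_neg (fun h => hlen h.2), List.getElem?_eq_none (by simpa using hk),
        List.getElem?_eq_none (by simp [PySem.List.length_pyRange_one]; omega)]

-- the inner column loop of A modifies the same row every iteration: hoist the modify out
theorem pv_modify_hoist (l : List Int) (i : Nat) (A : List (List Int)) :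
    l.foldl (fun A c => A.modify i (fun r => r.set c.toNat 1)) A =
      A.modify i (fun r => l.foldl (fun r c => r.set c.toNat 1) r) := by
  induction l generalizing A with
  | nil => exact (List.modify_id i A).symm
  | cons c t ih =>
    rw [List.foldl_cons, ih, List.modify_modify_eq]
    simp only [List.foldl_cons]
    rfl

-- ===== VERDICT (by name: the statement is the Claim_ definition above) =====
theorem innerCells_spec : Claim_equal_innerCells := by
  intro w h_ _
  unfold Spec_innerCells innerCells innerCells_alt
  rw [pv_createBoard,
      show (fun (A : List (List Int)) (row : Int) =>
        (PySem.List.pyRange 1 (w - 1) 1).foldl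
          (fun A col => A.modify row.toNat (fun r => r.set col.toNat 1)) A) =
        fun A row => A.modify row.toNat (pvG w) from by
          funext A row
          exact pv_modify_hoist _ _ _,
      pv_foldl_push]
  apply List.ext_getElem?
  intro j
  rw [pv_modify_fold_getElem? (pvG w) (pvG_idem w) _ (by
        intro x hx; have := (PySem.List.mem_pyRange_one).mp hx; omega),
      List.nil_append]
  by_cases hj : j < h_.toNat
  · have hsome : (PySem.List.pyRange 0 h_ 1)[j]? = some (0 + (j : Int)) := by
      rw [PySem.List.getElem?_pyRange_one, if_pos (show j < (h_ - 0).toNat by omega)]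
    rw [List.getElem?_map, hsome, Option.map_some, List.getElem?_replicate, if_pos hj]
    by_cases hm : (j : Int) ∈ PySem.List.pyRange 1 (h_ - 1) 1
    · have hjm := (PySem.List.mem_pyRange_one).mp hm
      rw [if_pos hm, if_pos (by constructor <;> omega), Option.map_some, pv_row_eq w]
    · have hjm : ¬ (1 ≤ (j : Int) ∧ (j : Int) < h_ - 1) :=
        fun h => hm ((PySem.List.mem_pyRange_one).mpr h)
      rw [if_neg hm, if_neg (by intro h; exact hjm ⟨by omega, by omega⟩)]
  · have hnone : (List.replicate h_.toNat (List.replicate w.toNat (0:Int)))[j]? = none :=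
      List.getElem?_eq_none (by simpa using hj)
    have hm : (j : Int) ∉ PySem.List.pyRange 1 (h_ - 1) 1 := by
      intro h
      have := (PySem.List.mem_pyRange_one).mp h
      omega
    rw [if_neg hm, hnone, List.getElem?_eq_none]
    simp only [List.length_map, PySem.List.length_pyRange_one]
    omega
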